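-- pv_equiv track=rewrite | github.com/lliaolia94-wq/astropsychology-app | services/synastry_service.py | _calculate_compatibility_score
-- ===== SOURCE A (Python) =====
-- from typing import Dict, List
--
-- def _calculate_compatibility_score(aspects: List[Dict]) -> int:
--     """Расчет балла совместимости"""
--     if not aspects:
--         return 50
--
--     score = 50
--     for aspect in aspects:
--         if aspect['aspect'] in ['sextile', 'trine']:
--             score += 10
--         elif aspect['aspect'] in ['square', 'opposition']:
--             score -= 5
--         elif aspect['aspect'] == 'conjunction':
--             score += 5
--
--     return max(0, min(100, score))
-- ===== SOURCE B (Python) =====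
-- from typing import Dict, List
--
-- WEIGHT = {'sextile': 10, 'trine': 10, 'square': -5, 'opposition': -5, 'conjunction': 5}
--
--
-- def _calculate_compatibility_score(aspects: List[Dict]) -> int:
--     """Table-driven divide-and-conquer: sum per-aspect weights over index halves, then clamp."""
--     def total(lo: int, hi: int) -> int:
--         if hi - lo == 0:
--             return 0
--         if hi - lo == 1:
--             return WEIGHT.get(aspects[lo]['aspect'], 0)
--         mid = (lo + hi) // 2
--         return total(lo, mid) + total(mid, hi)
--
--     return max(0, min(100, 50 + total(0, len(aspects))))
-- ===== Notes on version B (the rewrite author's own statement) =====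
-- stated objective: alternative
-- what changed: Replaced the sequential per-element if/elif accumulator loop by a weight-table (dict) lookup combined through a divide-and-conquer recursion over index halves, with a single clamp of 50 plus the recursive total (no empty-list special case).
import Mathlib
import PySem

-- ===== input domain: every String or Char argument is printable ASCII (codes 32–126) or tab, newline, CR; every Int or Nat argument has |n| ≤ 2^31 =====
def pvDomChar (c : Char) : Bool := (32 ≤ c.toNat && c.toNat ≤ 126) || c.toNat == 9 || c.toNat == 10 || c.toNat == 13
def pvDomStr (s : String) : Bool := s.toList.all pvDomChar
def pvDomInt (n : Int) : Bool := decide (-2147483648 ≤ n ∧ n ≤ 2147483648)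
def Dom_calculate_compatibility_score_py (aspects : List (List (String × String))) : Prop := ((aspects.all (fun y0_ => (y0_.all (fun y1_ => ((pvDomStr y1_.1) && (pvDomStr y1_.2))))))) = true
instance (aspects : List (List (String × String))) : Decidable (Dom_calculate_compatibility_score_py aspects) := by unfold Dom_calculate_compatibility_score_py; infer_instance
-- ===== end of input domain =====

-- B replaces A's sequential if/elif accumulator loop by a weight-table (dict) lookup combined
-- through a divide-and-conquer recursion over index halves (alternative decomposition; same cost).
-- Both Pythons read aspect['aspect'] (KeyError when absent, excluded by Pre_); the ports read it
-- as first-match association-list lookup, exact on Pre_.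
def pvAspectGet (d : List (String × String)) : String :=
  (((d.find? (fun p => p.1 == "aspect")).map Prod.snd).getD "")

-- ===== PORT A =====
def calculate_compatibility_score_py (aspects : List (List (String × String))) : Int :=
  if aspects = [] then 50
  else
    let score : Int := aspects.foldl (fun score aspect =>
      if pvAspectGet aspect = "sextile" ∨ pvAspectGet aspect = "trine" then score + 10
      else if pvAspectGet aspect = "square" ∨ pvAspectGet aspect = "opposition" then score - 5
      else if pvAspectGet aspect = "conjunction" then score + 5
      else score) 50
    max 0 (min 100 score)

-- ===== PORT B =====
-- the module-level WEIGHT dict of Source B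
def pvWEIGHT : PySem.Dict String Int :=
  PySem.Dict.ofList [("sextile", 10), ("trine", 10), ("square", -5), ("opposition", -5), ("conjunction", 5)]

-- Source B's inner 'total(lo, hi)': indices are Nats here (always 0 ≤ lo < hi ≤ len at every access,
-- so the total '.getD []' form of aspects[lo] is exact).
def pvTotal (aspects : List (List (String × String))) (lo hi : Nat) : Int :=
  if hi - lo = 0 then 0
  else if hi - lo = 1 then pvWEIGHT.getD (pvAspectGet ((PySem.List.pyGet? aspects (lo : Int)).getD [])) 0
  else
    pvTotal aspects lo ((lo + hi) / 2) + pvTotal aspects ((lo + hi) / 2) hi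
termination_by hi - lo
decreasing_by all_goals omega

def calculate_compatibility_score_py_alt (aspects : List (List (String × String))) : Int :=
  max 0 (min 100 (50 + pvTotal aspects 0 aspects.length))

-- ===== PRECONDITION & SPEC =====
-- Pre_ excludes exactly the inputs where some aspect dict lacks the key 'aspect':
-- there both Pythons raise KeyError.
def Pre_calculate_compatibility_score_py (aspects : List (List (String × String))) : Prop :=
  ∀ d ∈ aspects, d.any (fun p => p.1 == "aspect")
instance (aspects : List (List (String × String))) : Decidable (Pre_calculate_compatibility_score_py aspects) := by unfold Pre_calculate_compatibility_score_py; infer_instance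

def pvWitness_calculate_compatibility_score_py : (List (List (String × String))) :=
  [[("aspect", "trine")], [("aspect", "square"), ("orb", "3")]]

def Spec_calculate_compatibility_score_py (aspects : List (List (String × String))) (out : Int) : Prop := out = calculate_compatibility_score_py_alt aspects
instance (aspects : List (List (String × String))) (out : Int) : Decidable (Spec_calculate_compatibility_score_py aspects out) := by unfold Spec_calculate_compatibility_score_py; infer_instance

-- ===== CLAIM =====
def Claim_equal_calculate_compatibility_score_py : Prop := ∀ (aspects : List (List (String × String))), Dom_calculate_compatibility_score_py aspects → Pre_calculate_compatibility_score_py aspects → Spec_calculate_compatibility_score_py aspects (calculate_compatibility_score_py aspects)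

-- ===== LEMMAS AND PROOFS =====

-- Per-element contribution of A's branch dispatch.
def pvContrib (a : String) : Int :=
  if a = "sextile" ∨ a = "trine" then 10
  else if a = "square" ∨ a = "opposition" then -5
  else if a = "conjunction" then 5
  else 0

theorem foldl_contrib (aspects : List (List (String × String))) (init : Int) :
    aspects.foldl (fun score aspect =>
      if pvAspectGet aspect = "sextile" ∨ pvAspectGet aspect = "trine" then score + 10
      else if pvAspectGet aspect = "square" ∨ pvAspectGet aspect = "opposition" then score - 5
      else if pvAspectGet aspect = "conjunction" then score + 5
      else score) init = init + (aspects.map (fun d => pvContrib (pvAspectGet d))).sum := by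
  induction aspects generalizing init with
  | nil => simp
  | cons d ds ih =>
    simp only [List.foldl_cons, List.map_cons, List.sum_cons, ih, pvContrib]
    split_ifs <;> ring

theorem weight_eq (s : String) : pvWEIGHT.getD s 0 = pvContrib s := by
  have hmk : pvWEIGHT = PySem.Dict.mk
      [("sextile", 10), ("trine", 10), ("square", -5), ("opposition", -5), ("conjunction", 5)] := by
    decide
  simp only [hmk, pvContrib, PySem.Dict.getD_eq_get?_getD]
  by_cases h1 : "sextile" = s <;> by_cases h2 : "trine" = s <;>
    by_cases h3 : "square" = s <;> by_cases h4 : "opposition" = s <;>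
    by_cases h5 : "conjunction" = s <;>
    simp_all [PySem.Dict.get?] <;> simp_all [eq_comm (a := s)]

-- pvTotal sums the weights of the slice [lo, hi).
theorem pvTotal_eq (a : List (List (String × String))) (n : Nat) :
    ∀ lo hi, hi - lo = n → hi ≤ a.length →
      pvTotal a lo hi = (((a.drop lo).take (hi - lo)).map (fun d => pvWEIGHT.getD (pvAspectGet d) 0)).sum := by
  induction n using Nat.strong_induction_on with
  | _ n ih =>
    intro lo hi hn hlen
    unfold pvTotal
    by_cases h0 : hi - lo = 0
    · simp [h0]
    · by_cases h1 : hi - lo = 1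
      · have hlt : lo < a.length := by omega
        rw [if_neg h0, if_pos h1, h1]
        rw [List.drop_eq_getElem_cons hlt]
        simp [hlt]
      · rw [if_neg h0, if_neg h1]
        have hsplit : hi - lo = (((lo + hi) / 2) - lo) + (hi - (lo + hi) / 2) := by omega
        rw [ih (((lo + hi) / 2) - lo) (by omega) lo ((lo + hi) / 2) rfl (by omega),
            ih (hi - (lo + hi) / 2) (by omega) ((lo + hi) / 2) hi rfl hlen,
            hsplit, List.take_add, List.map_append, List.sum_append, List.drop_drop,
            show lo + ((lo + hi) / 2 - lo) = (lo + hi) / 2 from by omega]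

-- ===== VERDICT =====
theorem calculate_compatibility_score_py_spec : Claim_equal_calculate_compatibility_score_py := by
  intro aspects _ _
  unfold Spec_calculate_compatibility_score_py
  unfold calculate_compatibility_score_py calculate_compatibility_score_py_alt
  rw [pvTotal_eq aspects aspects.length 0 aspects.length (by omega) le_rfl]
  by_cases h : aspects = []
  · subst h; decide
  · rw [if_neg h, foldl_contrib]
    simp [weight_eq]
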